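-- pv_equiv track=rewrite | github.com/dotzo/AdventOfCode2020 | AdventOfCode2020/Day-17.py | max_dim
-- ===== SOURCE A (Python) =====
-- def max_dim(space):
--     mx, my, mz = 0, 0 ,0
--     for (x,y,z), v in space.items():
--         if v == '.':
--             continue
--         if x > mx:
--             mx = x
--         if y > my:
--             my = y
--         if z > mz:
--             mz = z
--
--     return mx, my, mz
-- ===== SOURCE B (Python) =====
-- def max_dim(space):
--     active = [k for k, v in space.items() if v != '.']
--     mx = max((x for (x, y, z) in active), default=0)
--     my = max((y for (x, y, z) in active), default=0)
--     mz = max((z for (x, y, z) in active), default=0)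
--     return max(0, mx), max(0, my), max(0, mz)
-- ===== Notes on version B (the rewrite author's own statement) =====
-- stated objective: simpler
-- what changed: Replaces A's single pass with running per-axis maxima and manual comparisons by a filter of active coordinates plus three independent per-axis max reductions floored at 0.
import Mathlib
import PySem

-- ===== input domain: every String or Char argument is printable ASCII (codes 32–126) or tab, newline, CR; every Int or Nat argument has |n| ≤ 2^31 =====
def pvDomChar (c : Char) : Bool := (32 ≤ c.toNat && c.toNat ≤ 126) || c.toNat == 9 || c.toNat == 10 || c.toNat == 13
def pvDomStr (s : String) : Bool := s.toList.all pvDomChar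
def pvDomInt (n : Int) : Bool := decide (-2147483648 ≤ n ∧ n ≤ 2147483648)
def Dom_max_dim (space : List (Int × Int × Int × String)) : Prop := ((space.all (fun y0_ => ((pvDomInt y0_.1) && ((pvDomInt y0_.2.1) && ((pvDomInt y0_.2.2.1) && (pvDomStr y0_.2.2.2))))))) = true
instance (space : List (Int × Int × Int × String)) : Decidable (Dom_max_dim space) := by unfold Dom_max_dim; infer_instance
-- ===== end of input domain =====

-- B: computes the same componentwise maxima (floored at 0) by filtering the active
-- coordinates once and reducing each axis independently, instead of A's single pass
-- with three running maxima; same behaviour, simpler decomposition.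
-- ===== PORT A =====
def max_dim (space : List (Int × Int × Int × String)) : Int × Int × Int :=
  space.foldl
    (fun (s : Int × Int × Int) (e : Int × Int × Int × String) =>
      let (x, y, z, v) := e
      let (mx, my, mz) := s
      if v = "." then (mx, my, mz)
      else
        let mx := if x > mx then x else mx
        let my := if y > my then y else my
        let mz := if z > mz then z else mz
        (mx, my, mz))
    (0, 0, 0)

-- ===== PORT B =====
-- max(gen, default=0): 0 on the empty list, else fold max from the head
def pyMaxD0 (l : List Int) : Int :=
  match l with
  | [] => 0
  | a :: rest => rest.foldl max a

def max_dim_alt (space : List (Int × Int × Int × String)) : Int × Int × Int :=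
  let active := (space.filter (fun e => e.2.2.2 != ".")).map (fun e => (e.1, e.2.1, e.2.2.1))
  let mx := pyMaxD0 (active.map (fun p => p.1))
  let my := pyMaxD0 (active.map (fun p => p.2.1))
  let mz := pyMaxD0 (active.map (fun p => p.2.2))
  (max 0 mx, max 0 my, max 0 mz)

-- ===== PRECONDITION & SPEC =====
def Spec_max_dim (space : List (Int × Int × Int × String)) (out : Int × Int × Int) : Prop := out = max_dim_alt space
instance (space : List (Int × Int × Int × String)) (out : Int × Int × Int) : Decidable (Spec_max_dim space out) := by unfold Spec_max_dim; infer_instance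

-- ===== CLAIM (what is proved, stated in full; the proofs are below) =====
def Claim_equal_max_dim : Prop := ∀ (space : List (Int × Int × Int × String)), Dom_max_dim space → Spec_max_dim space (max_dim space)

-- ===== LEMMAS AND PROOFS =====

theorem foldl_max_pull (l : List Int) (a b : Int) :
    max b (l.foldl max a) = l.foldl max (max b a) := by
  induction l generalizing a with
  | nil => rfl
  | cons c cs ih =>
    simp only [List.foldl]
    rw [ih]
    congr 1
    omega

theorem max0_pyMaxD0 (l : List Int) : max 0 (pyMaxD0 l) = l.foldl max 0 := by
  cases l with
  | nil => rfl
  | cons a rest =>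
    simp only [pyMaxD0, List.foldl]
    rw [foldl_max_pull]

-- the active coordinates, per axis
def axX (space : List (Int × Int × Int × String)) : List Int :=
  ((space.filter (fun e => e.2.2.2 != ".")).map (fun e => (e.1, e.2.1, e.2.2.1))).map (fun p => p.1)
def axY (space : List (Int × Int × Int × String)) : List Int :=
  ((space.filter (fun e => e.2.2.2 != ".")).map (fun e => (e.1, e.2.1, e.2.2.1))).map (fun p => p.2.1)
def axZ (space : List (Int × Int × Int × String)) : List Int :=
  ((space.filter (fun e => e.2.2.2 != ".")).map (fun e => (e.1, e.2.1, e.2.2.1))).map (fun p => p.2.2)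

theorem foldlA_char (space : List (Int × Int × Int × String)) :
    ∀ mx my mz : Int,
      space.foldl
        (fun (s : Int × Int × Int) (e : Int × Int × Int × String) =>
          let (x, y, z, v) := e
          let (mx, my, mz) := s
          if v = "." then (mx, my, mz)
          else
            let mx := if x > mx then x else mx
            let my := if y > my then y else my
            let mz := if z > mz then z else mz
            (mx, my, mz))
        (mx, my, mz)
      = ((axX space).foldl max mx, (axY space).foldl max my, (axZ space).foldl max mz) := by
  induction space with
  | nil => intro mx my mz; rfl
  | cons e es ih =>
    intro mx my mz
    obtain ⟨x, y, z, v⟩ := e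
    by_cases hv : v = "."
    · have hv' : (v != ".") = false := by simp [hv]
      simp only [List.foldl, axX, axY, axZ, List.filter, hv', if_pos hv]
      exact ih mx my mz
    · have hv' : (v != ".") = true := by simp [hv]
      simp only [List.foldl, if_neg hv]
      rw [ih]
      have hx : (if x > mx then x else mx) = max mx x := by omega
      have hy : (if y > my then y else my) = max my y := by omega
      have hz : (if z > mz then z else mz) = max mz z := by omega
      rw [hx, hy, hz]
      simp only [axX, axY, axZ, List.filter_cons, hv', if_pos, List.map, List.foldl]

-- ===== VERDICT (by name: the statement is the Claim_ definition above) =====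
theorem max_dim_spec : Claim_equal_max_dim := by
  intro space _
  unfold Spec_max_dim max_dim max_dim_alt
  rw [foldlA_char]
  simp only [max0_pyMaxD0]
  rfl
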